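-- pv_equiv track=rewrite | github.com/chsh82/aprolabs | app/services/layout_analyzer.py | _build_text_with_underlines
-- ===== SOURCE A (Python) =====
-- def _build_text_with_underlines(block_no: int, words: list, underlined_keys: set) -> str:
--     lines: dict[int, list] = {}
--     for lno, wno, wtext in words:
--         lines.setdefault(lno, []).append((wno, wtext, (block_no, lno, wno) in underlined_keys))
--
--     result_lines = []
--     for lno in sorted(lines.keys()):
--         sorted_words = sorted(lines[lno], key=lambda x: x[0])
--         parts = []
--         span = []
--         current_ul = None
--         for _, wtext, is_ul in sorted_words:
--             if is_ul != current_ul: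
--                 if span:
--                     joined = " ".join(span)
--                     parts.append(f"<u>{joined}</u>" if current_ul else joined)
--                     span = []
--                 current_ul = is_ul
--             span.append(wtext)
--         if span:
--             joined = " ".join(span)
--             parts.append(f"<u>{joined}</u>" if current_ul else joined)
--         result_lines.append(" ".join(parts))
--
--     return " ".join(result_lines)
-- ===== SOURCE B (Python) =====
-- def _build_text_with_underlines(block_no: int, words: list, underlined_keys: set) -> str:
--     # No grouping at all: sort once globally by (line, word), then decide each
--     # word's decoration locally from its neighbours and do ONE flat join.
--     seq = [(lno, text, (block_no, lno, wno) in underlined_keys)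
--            for lno, wno, text in sorted(words, key=lambda w: (w[0], w[1]))]
--     pieces = []
--     for i, (lno, text, flag) in enumerate(seq):
--         piece = text
--         if flag:
--             prev = seq[i - 1] if i > 0 else None
--             nxt = seq[i + 1] if i + 1 < len(seq) else None
--             if prev is None or not prev[2] or prev[0] != lno:
--                 piece = "<u>" + piece
--             if nxt is None or not nxt[2] or nxt[0] != lno:
--                 piece = piece + "</u>"
--         pieces.append(piece)
--     return " ".join(pieces)
-- ===== Notes on version B (the rewrite author's own statement) =====
-- stated objective: alternative
-- what changed: Replaces A's grouping pipeline (dict keyed by line, per-line sort, run-accumulating state machine, nested joins) by a group-free algorithm: one global sort by (line, word), then each word's <u>/</u> decoration is decided locally from its two neighbours, and the result is a single flat space-join.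
import Mathlib
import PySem

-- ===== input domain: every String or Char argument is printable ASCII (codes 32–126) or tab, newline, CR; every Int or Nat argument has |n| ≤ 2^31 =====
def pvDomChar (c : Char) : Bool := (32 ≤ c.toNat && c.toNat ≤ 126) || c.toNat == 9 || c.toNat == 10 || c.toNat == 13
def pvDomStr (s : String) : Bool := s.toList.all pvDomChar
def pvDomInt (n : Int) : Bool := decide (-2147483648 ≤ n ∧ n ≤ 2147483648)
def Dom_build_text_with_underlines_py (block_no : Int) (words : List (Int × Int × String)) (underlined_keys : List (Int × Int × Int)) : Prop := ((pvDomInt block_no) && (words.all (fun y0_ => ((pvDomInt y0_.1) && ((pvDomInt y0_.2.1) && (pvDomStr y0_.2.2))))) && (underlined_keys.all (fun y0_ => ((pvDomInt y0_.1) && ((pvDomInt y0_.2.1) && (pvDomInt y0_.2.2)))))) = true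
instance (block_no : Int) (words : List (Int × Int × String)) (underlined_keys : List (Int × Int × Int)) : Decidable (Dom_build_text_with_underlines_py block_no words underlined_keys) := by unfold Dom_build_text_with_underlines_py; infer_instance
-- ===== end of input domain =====

-- B removes A's grouping pipeline (dict keyed by line, per-line sort, run-accumulating state
-- machine, nested joins): it sorts once globally by (line, word), decides each word's
-- <u>/</u> decoration locally from its two neighbours, and does one flat space-join.

-- ===== PORT A =====
def build_text_with_underlines_py (block_no : Int) (words : List (Int × Int × String)) (underlined_keys : List (Int × Int × Int)) : String :=
  -- lines: dict[int, list]; setdefault(lno, []).append(...) = store get(lno, []) ++ [item]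
  let lines : PySem.Dict Int (List (Int × String × Bool)) :=
    words.foldl (fun d w =>
      PySem.Dict.insert d w.1
        (PySem.Dict.getD d w.1 [] ++ [(w.2.1, w.2.2, decide ((block_no, w.1, w.2.1) ∈ underlined_keys))]))
      PySem.Dict.empty
  let result_lines : List String :=
    (PySem.List.sorted (PySem.Dict.keys lines) (fun k => k) false).foldl (fun acc lno =>
      let sorted_words := PySem.List.sorted (PySem.Dict.getD lines lno []) (fun x => x.1) false
      -- state (parts, span, current_ul); current_ul : Option Bool (None at start)
      let st := sorted_words.foldl
        (fun (st : List String × List String × Option Bool) x =>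
          if some x.2.2 ≠ st.2.2 then
            let parts := if st.2.1 ≠ [] then
                st.1 ++ [if st.2.2 = some true then "<u>" ++ PySem.Str.join " " st.2.1 ++ "</u>"
                         else PySem.Str.join " " st.2.1]
              else st.1
            (parts, [x.2.1], some x.2.2)
          else (st.1, st.2.1 ++ [x.2.1], st.2.2))
        ([], [], none)
      let parts := if st.2.1 ≠ [] then
          st.1 ++ [if st.2.2 = some true then "<u>" ++ PySem.Str.join " " st.2.1 ++ "</u>"
                   else PySem.Str.join " " st.2.1]
        else st.1
      acc ++ [PySem.Str.join " " parts]) []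
  PySem.Str.join " " result_lines

-- ===== PORT B =====
-- the body of Source B's single loop over enumerate(seq): decoration of word #i from its neighbours
def pvPieceB (seq : List (Int × String × Bool)) (p : Int × Int × String × Bool) : String :=
  let i := p.1
  let lno := p.2.1
  let text := p.2.2.1
  let flag := p.2.2.2
  if flag then
    let prev : Option (Int × String × Bool) :=
      if 0 < i then PySem.List.pyGet? seq (i - 1) else none
    let nxt : Option (Int × String × Bool) :=
      if i + 1 < (seq.length : Int) then PySem.List.pyGet? seq (i + 1) else none
    let piece :=
      if (match prev with | none => true | some q => !q.2.2 || decide (q.1 ≠ lno))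
      then "<u>" ++ text else text
    if (match nxt with | none => true | some q => !q.2.2 || decide (q.1 ≠ lno))
    then piece ++ "</u>" else piece
  else text

def build_text_with_underlines_py_alt (block_no : Int) (words : List (Int × Int × String)) (underlined_keys : List (Int × Int × Int)) : String :=
  -- seq = [(lno, text, key in underlined_keys) for ... in sorted(words, key=lambda w: (w[0], w[1]))]
  let seq : List (Int × String × Bool) :=
    (PySem.List.sorted2 words (fun w => w.1) (fun w => w.2.1) false).map
      (fun w => (w.1, w.2.2, decide ((block_no, w.1, w.2.1) ∈ underlined_keys)))
  let pieces : List String :=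
    (PySem.List.enumerate seq).foldl (fun acc p => acc ++ [pvPieceB seq p]) []
  PySem.Str.join " " pieces

-- ===== PRECONDITION & SPEC =====
def Spec_build_text_with_underlines_py (block_no : Int) (words : List (Int × Int × String)) (underlined_keys : List (Int × Int × Int)) (out : String) : Prop := out = build_text_with_underlines_py_alt block_no words underlined_keys
instance (block_no : Int) (words : List (Int × Int × String)) (underlined_keys : List (Int × Int × Int)) (out : String) : Decidable (Spec_build_text_with_underlines_py block_no words underlined_keys out) := by unfold Spec_build_text_with_underlines_py; infer_instance

-- ===== CLAIM (what is proved, stated in full; the proofs are below) =====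
def Claim_equal_build_text_with_underlines_py : Prop := ∀ (block_no : Int) (words : List (Int × Int × String)) (underlined_keys : List (Int × Int × Int)), Dom_build_text_with_underlines_py block_no words underlined_keys → Spec_build_text_with_underlines_py block_no words underlined_keys (build_text_with_underlines_py block_no words underlined_keys)

-- ===== LEMMAS AND PROOFS =====

-- ---------- shared abbreviations for A's inner state machine ----------

def pvWrap (f : Bool) (s : String) : String := if f then "<u>" ++ s ++ "</u>" else s

def pvRender (f : Bool) (ts : List String) : String := pvWrap f (PySem.Str.join " " ts)

def pvStep (st : List String × List String × Option Bool) (x : String × Bool) :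
    List String × List String × Option Bool :=
  if some x.2 ≠ st.2.2 then
    (( if st.2.1 ≠ [] then
        st.1 ++ [if st.2.2 = some true then "<u>" ++ PySem.Str.join " " st.2.1 ++ "</u>"
                 else PySem.Str.join " " st.2.1]
      else st.1), [x.1], some x.2)
  else (st.1, st.2.1 ++ [x.1], st.2.2)

def pvFlush (st : List String × List String × Option Bool) : List String :=
  if st.2.1 ≠ [] then
    st.1 ++ [if st.2.2 = some true then "<u>" ++ PySem.Str.join " " st.2.1 ++ "</u>"
             else PySem.Str.join " " st.2.1]
  else st.1

theorem pv_step_eq : (fun (st : List String × List String × Option Bool) (x : Int × String × Bool) =>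
    if some x.2.2 ≠ st.2.2 then
      ((if st.2.1 ≠ [] then
          st.1 ++ [if st.2.2 = some true then "<u>" ++ PySem.Str.join " " st.2.1 ++ "</u>"
                   else PySem.Str.join " " st.2.1]
        else st.1), [x.2.1], some x.2.2)
    else (st.1, st.2.1 ++ [x.2.1], st.2.2)) =
    (fun st (x : Int × String × Bool) => pvStep st x.2) := rfl

theorem pv_flush_eq (st : List String × List String × Option Bool) :
    (if st.2.1 ≠ [] then
      st.1 ++ [if st.2.2 = some true then "<u>" ++ PySem.Str.join " " st.2.1 ++ "</u>"
               else PySem.Str.join " " st.2.1]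
     else st.1) = pvFlush st := rfl

-- ---------- runs of consecutive equal keys ----------

def runsSpec {α κ : Type} [BEq κ] (key : α → κ) : List α → List (κ × List α)
  | [] => []
  | x :: t =>
      (key x, x :: t.takeWhile (fun y => key y == key x)) ::
        runsSpec key (t.dropWhile (fun y => key y == key x))
  termination_by l => l.length
  decreasing_by simpa using Nat.lt_succ_of_le (List.length_dropWhile_le _ _)

theorem pv_head_dropWhile {α : Type} (p : α → Bool) :
    ∀ (l : List α) (y : α) (ys : List α), l.dropWhile p = y :: ys → p y = false := by
  intro l
  induction l with
  | nil => intro y ys h; simp at h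
  | cons a t ih =>
    intro y ys h
    rw [List.dropWhile_cons] at h
    by_cases hp : p a
    · rw [if_pos hp] at h; exact ih y ys h
    · rw [if_neg hp] at h; cases h; simpa using hp

-- ---------- stable insertion sort: generic lemmas ----------

theorem pv_insertBy_head {α : Type} (before : α → α → Bool) (x : α) (l : List α)
    (h : ∀ y, l.head? = some y → before x y = true) :
    PySem.List.insertBy before x l = x :: l := by
  cases l with
  | nil => rfl
  | cons y ys => simp [PySem.List.insertBy, h y rfl]

theorem pv_filter_insertBy {α κ : Type} [LinearOrder κ] (key : α → κ) (p : α → Bool) (x : α) :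
    ∀ l : List α, l.Pairwise (fun a b => key a ≤ key b) →
    (PySem.List.insertBy (fun a b => decide (key a < key b)) x l).filter p =
      if p x then PySem.List.insertBy (fun a b => decide (key a < key b)) x (l.filter p)
      else l.filter p := by
  intro l
  induction l with
  | nil => intro _; by_cases hp : p x <;> simp [PySem.List.insertBy, hp]
  | cons y t ih =>
    intro hpw
    have hpt : t.Pairwise (fun a b => key a ≤ key b) := hpw.tail
    have hyt : ∀ z ∈ t, key y ≤ key z := by
      intro z hz; exact (List.pairwise_cons.mp hpw).1 z hz
    by_cases hlt : key x < key y
    · have hins : PySem.List.insertBy (fun a b => decide (key a < key b)) x (y :: t) = x :: y :: t := by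
        simp [PySem.List.insertBy, hlt]
      have hh : ∀ z, ((y :: t).filter p).head? = some z →
          (fun a b => decide (key a < key b)) x z = true := by
        intro z hz
        have hzmem : z ∈ (y :: t).filter p := List.mem_of_mem_head? hz
        have hzmem' : z ∈ y :: t := List.mem_of_mem_filter hzmem
        rcases List.mem_cons.mp hzmem' with h1 | h1
        · subst h1; simpa using hlt
        · simpa using lt_of_lt_of_le hlt (hyt z h1)
      rw [hins]
      by_cases hp : p x
      · rw [if_pos hp, pv_insertBy_head _ _ _ hh]
        simp [List.filter_cons, hp]
      · simp [hp]
    · have : PySem.List.insertBy (fun a b => decide (key a < key b)) x (y :: t) =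
          y :: PySem.List.insertBy (fun a b => decide (key a < key b)) x t := by
        simp [PySem.List.insertBy, hlt]
      rw [this]
      by_cases hpy : p y
      · by_cases hp : p x
        · simp only [List.filter_cons, hpy, hp, if_pos]
          rw [ih hpt]
          simp only [hp, if_pos]
          have : PySem.List.insertBy (fun a b => decide (key a < key b)) x (y :: t.filter p) =
              y :: PySem.List.insertBy (fun a b => decide (key a < key b)) x (t.filter p) := by
            simp [PySem.List.insertBy, hlt]
          simp [this, List.filter_cons, hpy]
        · simp [List.filter_cons, hpy, hp, ih hpt]
      · by_cases hp : p x
        · simp [List.filter_cons, hpy, hp, ih hpt]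
        · simp [List.filter_cons, hpy, hp, ih hpt]

theorem pv_sorted_append_singleton {α κ : Type} [LT κ] [DecidableLT κ] (xs : List α) (x : α) (key : α → κ) :
    PySem.List.sorted (xs ++ [x]) key false =
      PySem.List.insertBy (fun a b => decide (key a < key b)) x (PySem.List.sorted xs key false) := by
  rw [PySem.List.sorted_eq_foldl_insertBy, PySem.List.sorted_eq_foldl_insertBy, List.foldl_append]
  rfl

theorem pv_filter_sorted {α κ : Type} [LinearOrder κ] (key : α → κ) (p : α → Bool) (xs : List α) :
    (PySem.List.sorted xs key false).filter p = PySem.List.sorted (xs.filter p) key false := by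
  induction xs using List.reverseRecOn with
  | nil => simp [PySem.List.sorted]
  | append_singleton ws x ih =>
    rw [pv_sorted_append_singleton, pv_filter_insertBy key p x _ (PySem.List.sorted_pairwise _ _),
      List.filter_append]
    by_cases hp : p x
    · rw [if_pos hp, ih, show (List.filter p [x]) = [x] by simp [hp], pv_sorted_append_singleton]
    · rw [if_neg (by simp [hp]), ih, show (List.filter p [x]) = [] by simp [hp], List.append_nil]

theorem pv_sorted_map {α β κ : Type} [LinearOrder κ] (f : α → β) (key : β → κ) (xs : List α) :
    PySem.List.sorted (xs.map f) key false =
      (PySem.List.sorted xs (fun a => key (f a)) false).map f := by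
  induction xs using List.reverseRecOn with
  | nil => simp [PySem.List.sorted]
  | append_singleton ws x ih =>
    rw [List.map_append, List.map_cons, List.map_nil, pv_sorted_append_singleton,
      pv_sorted_append_singleton, ih]
    generalize PySem.List.sorted ws (fun a => key (f a)) false = l
    induction l with
    | nil => rfl
    | cons y t ihl =>
      by_cases h : key (f x) < key (f y)
      · simp [PySem.List.insertBy, h]
      · simp [PySem.List.insertBy, h, ihl]

theorem pv_unique {α κ : Type} [LinearOrder κ] [BEq κ] [LawfulBEq κ] (key : α → κ) :
    ∀ (l₁ l₂ : List α), l₁.Pairwise (fun a b => key a ≤ key b) →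
      l₂.Pairwise (fun a b => key a ≤ key b) →
      (∀ v : κ, l₁.filter (fun x => key x == v) = l₂.filter (fun x => key x == v)) →
      l₁ = l₂ := by
  intro l₁
  induction l₁ with
  | nil =>
    intro l₂ _ _ hf
    cases l₂ with
    | nil => rfl
    | cons b t₂ => have := hf (key b); simp at this
  | cons a t₁ ih =>
    intro l₂ h₁ h₂ hf
    cases l₂ with
    | nil => have := hf (key a); simp at this
    | cons b t₂ =>
      have h₁t : t₁.Pairwise (fun a b => key a ≤ key b) := h₁.tail
      have h₂t : t₂.Pairwise (fun a b => key a ≤ key b) := h₂.tail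
      have ha : ∀ z ∈ t₁, key a ≤ key z := (List.pairwise_cons.mp h₁).1
      have hb : ∀ z ∈ t₂, key b ≤ key z := (List.pairwise_cons.mp h₂).1
      by_cases hab : key b = key a
      · have hfa := hf (key a)
        rw [List.filter_cons, List.filter_cons, if_pos (by simp), if_pos (by simp [hab])] at hfa
        have hhead : a = b := List.head_eq_of_cons_eq hfa
        have htailk : t₁.filter (fun x => key x == key a) = t₂.filter (fun x => key x == key a) :=
          List.tail_eq_of_cons_eq hfa
        subst hhead
        congr 1
        apply ih t₂ h₁t h₂t
        intro v
        have hfv := hf v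
        rw [List.filter_cons, List.filter_cons] at hfv
        by_cases hv : (key a == v) = true
        · rw [if_pos hv, if_pos hv] at hfv
          exact List.tail_eq_of_cons_eq hfv
        · rwa [if_neg (by simp_all), if_neg (by simp_all)] at hfv
      · exfalso
        have h1 : key b ≤ key a := by
          have hfa := hf (key a)
          rw [List.filter_cons (α := α), if_pos (by simp)] at hfa
          have hmem : a ∈ (b :: t₂).filter (fun x => key x == key a) := by
            rw [← hfa]; exact List.mem_cons_self ..
          rcases List.mem_cons.mp (List.mem_of_mem_filter hmem) with h | h
          · exact absurd (congrArg key h.symm) hab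
          · exact hb a h
        have h2 : key a ≤ key b := by
          have hfb := hf (key b)
          rw [show List.filter (fun x => key x == key b) (b :: t₂) = _ from List.filter_cons .., if_pos (by simp)] at hfb
          have hmem : b ∈ (a :: t₁).filter (fun x => key x == key b) := by
            rw [hfb]; exact List.mem_cons_self ..
          rcases List.mem_cons.mp (List.mem_of_mem_filter hmem) with h | h
          · exact absurd (congrArg key h) hab
          · exact ha b h
        exact hab (le_antisymm h1 h2)

theorem pv_decomp {α : Type} (key : α → Int) (ys : List α) (ks : List Int)
    (hks : ks.Pairwise (· < ·))
    (hmem : ∀ v, v ∈ ks ↔ v ∈ ys.map key) :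
    PySem.List.sorted ys key false = ks.flatMap (fun v => ys.filter (fun y => key y == v)) := by
  have hconstP : ∀ (u : Int), (ys.filter (fun y => key y == u)).Pairwise (fun a b => key a ≤ key b) := by
    intro u
    apply List.pairwise_of_forall_mem_list
    intro a ha b hb
    have h1 : key a = u := by simpa using List.of_mem_filter ha
    have h2 : key b = u := by simpa using List.of_mem_filter hb
    rw [h1, h2]
  apply pv_unique key
  · exact PySem.List.sorted_pairwise _ _
  · clear hmem
    induction ks with
    | nil => simp
    | cons k ks' ihk =>
      rw [List.flatMap_cons, List.pairwise_append]
      refine ⟨?_, ihk hks.tail, ?_⟩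
      · exact hconstP k
      · intro x hx y hy
        have hxk : key x = k := by
          have := List.of_mem_filter hx; simpa using this
        have : ∃ u ∈ ks', y ∈ ys.filter (fun z => key z == u) := by
          simpa using List.mem_flatMap.mp hy
        obtain ⟨u, hu, hyu⟩ := this
        have hyk : key y = u := by have := List.of_mem_filter hyu; simpa using this
        have : k < u := (List.pairwise_cons.mp hks).1 u hu
        rw [hxk, hyk]; exact le_of_lt this
  · intro v
    rw [pv_filter_sorted]
    rw [PySem.List.sorted_eq_self_of_pairwise _ _ (hconstP v)]
    rw [List.filter_flatMap]
    have hfib : ∀ u, (ys.filter (fun y => key y == u)).filter (fun x => key x == v) =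
        if u = v then ys.filter (fun y => key y == v) else [] := by
      intro u
      by_cases huv : u = v
      · subst huv; simp [List.filter_filter]
      · rw [if_neg huv]
        apply List.filter_eq_nil_iff.mpr
        intro x hx
        have : key x = u := by simpa using List.of_mem_filter hx
        simp [this, huv]
    have hnodup : ks.Nodup := hks.nodup
    by_cases hv : v ∈ ks
    · clear hmem hks
      induction ks with
      | nil => simp at hv
      | cons k ks' ihk =>
        rw [List.flatMap_cons, hfib k]
        rcases List.mem_cons.mp hv with h | h
        · subst h
          rw [if_pos rfl]
          have : ks'.flatMap (fun u => (ys.filter (fun y => key y == u)).filter (fun x => key x == v)) = [] := by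
            apply List.flatMap_eq_nil_iff.mpr
            intro u hu
            rw [hfib u, if_neg]
            intro e; subst e; exact (List.nodup_cons.mp hnodup).1 hu
          rw [this, List.append_nil]
        · rw [if_neg, List.nil_append]
          · exact ihk (List.nodup_cons.mp hnodup).2 h
          · intro e; subst e; exact (List.nodup_cons.mp hnodup).1 h
    · have h1 : ys.filter (fun y => key y == v) = [] := by
        apply List.filter_eq_nil_iff.mpr
        intro x hx
        intro hc
        exact hv ((hmem v).mpr (by simp; exact ⟨x, hx, by simpa using hc⟩))
      rw [h1]
      symm
      apply List.flatMap_eq_nil_iff.mpr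
      intro u hu
      rw [hfib u, if_neg]
      intro e; subst e; exact hv hu

-- ---------- sorted2 (tuple key) = two-pass stable sort ----------

theorem pv_sorted2_eq {α : Type} (xs : List α) (k1 k2 : α → Int) :
    PySem.List.sorted2 xs k1 k2 false =
      PySem.List.sorted xs (fun x => toLex (k1 x, k2 x)) false := by
  show xs.foldl (fun acc x => PySem.List.insertBy _ x acc) [] =
    xs.foldl (fun acc x => PySem.List.insertBy _ x acc) []
  have hb : (fun a b => decide (k1 a < k1 b) || (!decide (k1 b < k1 a) && decide (k2 a < k2 b))) =
      (fun a b : α => decide ((fun x => toLex (k1 x, k2 x)) a < (fun x => toLex (k1 x, k2 x)) b)) := by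
    funext a b
    by_cases h1 : k1 a < k1 b <;> by_cases h2 : k1 b < k1 a <;> by_cases h3 : k2 a < k2 b <;>
      simp [Prod.Lex.lt_iff, h1, h2, h3] <;> omega
  rw [hb]

theorem pv_lex_pairwise {α : Type} (k1 k2 : α → Int) :
    ∀ l : List α, l.Pairwise (fun a b => k1 a ≤ k1 b) →
      (∀ c : Int, (l.filter (fun x => k1 x == c)).Pairwise (fun a b => k2 a ≤ k2 b)) →
      l.Pairwise (fun a b => toLex (k1 a, k2 a) ≤ toLex (k1 b, k2 b)) := by
  intro l
  induction l with
  | nil => intro _ _; exact List.Pairwise.nil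
  | cons x t ih =>
    intro h1 h2
    rw [List.pairwise_cons]
    constructor
    · intro y hy
      have hle : k1 x ≤ k1 y := (List.pairwise_cons.mp h1).1 y hy
      rcases lt_or_eq_of_le hle with hlt | heq
      · exact Prod.Lex.le_iff.mpr (Or.inl hlt)
      · have hfx := h2 (k1 x)
        rw [List.filter_cons, if_pos (by simp)] at hfx
        have hymem : y ∈ t.filter (fun z => k1 z == k1 x) :=
          List.mem_filter.mpr ⟨hy, by simp [← heq]⟩
        have : k2 x ≤ k2 y := (List.pairwise_cons.mp hfx).1 y hymem
        exact Prod.Lex.le_iff.mpr (Or.inr ⟨heq, this⟩)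
    · apply ih h1.tail
      intro c
      have hfc := h2 c
      rw [List.filter_cons] at hfc
      by_cases hxc : (k1 x == c) = true
      · rw [if_pos hxc] at hfc; exact hfc.tail
      · rwa [if_neg (by simpa using hxc)] at hfc

theorem pv_const_lex_pairwise {α : Type} (k1 k2 : α → Int) (v : Lex (Int × Int)) (ys : List α) :
    ((ys.filter (fun x => toLex (k1 x, k2 x) == v))).Pairwise
      (fun a b => toLex (k1 a, k2 a) ≤ toLex (k1 b, k2 b)) := by
  apply List.pairwise_of_forall_mem_list
  intro a ha b hb
  have h1 : toLex (k1 a, k2 a) = v := by simpa using List.of_mem_filter ha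
  have h2 : toLex (k1 b, k2 b) = v := by simpa using List.of_mem_filter hb
  rw [h1, h2]

theorem pv_two_pass {α : Type} (xs : List α) (k1 k2 : α → Int) :
    PySem.List.sorted2 xs k1 k2 false =
      PySem.List.sorted (PySem.List.sorted xs k2 false) k1 false := by
  rw [pv_sorted2_eq]
  apply pv_unique (fun x => toLex (k1 x, k2 x))
  · exact PySem.List.sorted_pairwise _ _
  · apply pv_lex_pairwise
    · exact PySem.List.sorted_pairwise _ _
    · intro c
      rw [pv_filter_sorted (fun x => k1 x) (fun x => k1 x == c) (PySem.List.sorted xs k2 false),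
        PySem.List.sorted_eq_self_of_pairwise]
      · exact List.Pairwise.filter _ (PySem.List.sorted_pairwise _ _)
      · apply List.pairwise_of_forall_mem_list
        intro a ha b hb
        have h1 : k1 a = c := by simpa using List.of_mem_filter ha
        have h2 : k1 b = c := by simpa using List.of_mem_filter hb
        rw [h1, h2]
  · intro v
    have hconst1 : ∀ (l : List α), (l.filter (fun x => toLex (k1 x, k2 x) == v)).Pairwise
        (fun a b => k1 a ≤ k1 b) := by
      intro l
      apply List.pairwise_of_forall_mem_list
      intro a ha b hb
      have h1 : toLex (k1 a, k2 a) = v := by simpa using List.of_mem_filter ha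
      have h2 : toLex (k1 b, k2 b) = v := by simpa using List.of_mem_filter hb
      have e1 : k1 a = (ofLex v).1 := by rw [← h1]; rfl
      have e2 : k1 b = (ofLex v).1 := by rw [← h2]; rfl
      rw [e1, e2]
    have hconst2 : ∀ (l : List α), (l.filter (fun x => toLex (k1 x, k2 x) == v)).Pairwise
        (fun a b => k2 a ≤ k2 b) := by
      intro l
      apply List.pairwise_of_forall_mem_list
      intro a ha b hb
      have h1 : toLex (k1 a, k2 a) = v := by simpa using List.of_mem_filter ha
      have h2 : toLex (k1 b, k2 b) = v := by simpa using List.of_mem_filter hb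
      have e1 : k2 a = (ofLex v).2 := by rw [← h1]; rfl
      have e2 : k2 b = (ofLex v).2 := by rw [← h2]; rfl
      rw [e1, e2]
    rw [pv_filter_sorted (fun x => toLex (k1 x, k2 x)) _ xs,
      PySem.List.sorted_eq_self_of_pairwise _ _ (pv_const_lex_pairwise k1 k2 v xs),
      pv_filter_sorted (fun x => k1 x) _ (PySem.List.sorted xs k2 false),
      PySem.List.sorted_eq_self_of_pairwise _ _ (hconst1 _),
      pv_filter_sorted (fun x => k2 x) _ xs,
      PySem.List.sorted_eq_self_of_pairwise _ _ (hconst2 _)]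

-- ---------- A's dict of lines, characterised ----------

def pvItem (b : Int) (uk : List (Int × Int × Int)) (w : Int × Int × String) : Int × String × Bool :=
  (w.2.1, w.2.2, decide ((b, w.1, w.2.1) ∈ uk))

def pvLinesChar (b : Int) (uk : List (Int × Int × Int)) (ws : List (Int × Int × String)) :
    List (Int × List (Int × String × Bool)) :=
  (PySem.List.dedup (ws.map (fun w => w.1))).map
    (fun v => (v, (ws.filter (fun w => w.1 == v)).map (pvItem b uk)))

theorem pv_find_map {ν : Type} (g : Int → ν) (l : List Int) (k : Int) :
    (l.map (fun v => (v, g v))).find? (fun p => p.1 == k) =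
      if k ∈ l then some (k, g k) else none := by
  induction l with
  | nil => simp
  | cons a t ih =>
    rw [List.map_cons]
    by_cases hak : a = k
    · subst hak
      rw [List.find?_cons_of_pos (by simp)]
      simp
    · rw [List.find?_cons_of_neg (by simpa using hak), ih]
      by_cases hk : k ∈ t
      · rw [if_pos hk, if_pos (List.mem_cons_of_mem _ hk)]
      · rw [if_neg hk, if_neg (by rw [List.mem_cons]; push_neg; exact ⟨fun e => hak e.symm, hk⟩)]

theorem pv_dedup_append_singleton {α : Type} [BEq α] (u : List α) (k : α) :
    PySem.List.dedup (u ++ [k]) =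
      if (PySem.List.dedup u).contains k then PySem.List.dedup u else PySem.List.dedup u ++ [k] := by
  rw [PySem.List.dedup_eq_ofList, PySem.List.dedup_eq_ofList, PySem.Set.ofList_eq_foldl,
    PySem.Set.ofList_eq_foldl, List.foldl_append, List.foldl_cons, List.foldl_nil]
  rfl

theorem pv_lines_eq (b : Int) (uk : List (Int × Int × Int)) (ws : List (Int × Int × String)) :
    (ws.foldl (fun d w =>
      PySem.Dict.insert d w.1
        (PySem.Dict.getD d w.1 [] ++ [(w.2.1, w.2.2, decide ((b, w.1, w.2.1) ∈ uk))]))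
      PySem.Dict.empty : PySem.Dict Int (List (Int × String × Bool))) = ⟨pvLinesChar b uk ws⟩ := by
  induction ws using List.reverseRecOn with
  | nil => rfl
  | append_singleton ws w ih =>
    rw [List.foldl_append, List.foldl_cons, List.foldl_nil, ih]
    have hfind : ∀ k', (List.find? (fun p => p.1 == k') (pvLinesChar b uk ws)) =
        if k' ∈ PySem.List.dedup (ws.map (fun w => w.1))
        then some (k', (ws.filter (fun w => w.1 == k')).map (pvItem b uk)) else none := by
      intro k'
      exact pv_find_map (fun v => (ws.filter (fun w => w.1 == v)).map (pvItem b uk))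
        (PySem.List.dedup (ws.map (fun w => w.1))) k'
    by_cases hmem : w.1 ∈ ws.map (fun w => w.1)
    · have hkd : w.1 ∈ PySem.List.dedup (ws.map (fun w => w.1)) := by
        rw [PySem.List.dedup_eq_ofList]; exact (PySem.Set.mem_ofList _ _).mpr hmem
      have hcont : PySem.Dict.contains (⟨pvLinesChar b uk ws⟩ : PySem.Dict Int _) w.1 = true := by
        simp only [PySem.Dict.contains, pvLinesChar]
        rw [List.any_eq_true]
        exact ⟨(w.1, (ws.filter (fun x => x.1 == w.1)).map (pvItem b uk)),
          List.mem_map.mpr ⟨w.1, hkd, rfl⟩, by simp⟩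
      have hgetD : PySem.Dict.getD (⟨pvLinesChar b uk ws⟩ : PySem.Dict Int _) w.1 [] =
          (ws.filter (fun x => x.1 == w.1)).map (pvItem b uk) := by
        simp only [PySem.Dict.getD, PySem.Dict.get?]
        rw [hfind w.1, if_pos hkd]
        rfl
      simp only [PySem.Dict.insert, hcont, if_pos, hgetD]
      rw [PySem.Dict.mk.injEq]
      show (pvLinesChar b uk ws).map _ = pvLinesChar b uk (ws ++ [w])
      rw [pvLinesChar, pvLinesChar, List.map_map]
      have hdd2 : PySem.List.dedup ((ws ++ [w]).map (fun x => x.1)) =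
          PySem.List.dedup (ws.map (fun x => x.1)) := by
        rw [List.map_append, List.map_cons, List.map_nil, pv_dedup_append_singleton, if_pos]
        rw [PySem.List.dedup_eq_ofList, List.contains_eq_mem]
        simp only [decide_eq_true_eq]
        exact (PySem.Set.mem_ofList _ _).mpr hmem
      rw [hdd2]
      apply List.map_congr_left
      intro v hv
      simp only [Function.comp]
      by_cases hvk : v = w.1
      · rw [if_pos (by simp [hvk])]
        have hf : (ws ++ [w]).filter (fun x => x.1 == v) = ws.filter (fun x => x.1 == v) ++ [w] := by
          rw [List.filter_append]; simp [hvk]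
        rw [hf, List.map_append, hvk]
        rfl
      · rw [if_neg (by simpa using hvk)]
        have hf : (ws ++ [w]).filter (fun x => x.1 == v) = ws.filter (fun x => x.1 == v) := by
          rw [List.filter_append]
          simp [show (w.1 == v) = false by simpa using fun e => hvk e.symm]
        rw [hf]
    · have hkd : w.1 ∉ PySem.List.dedup (ws.map (fun x => x.1)) := by
        rw [PySem.List.dedup_eq_ofList]
        intro hc; exact hmem ((PySem.Set.mem_ofList _ _).mp hc)
      have hcont : PySem.Dict.contains (⟨pvLinesChar b uk ws⟩ : PySem.Dict Int _) w.1 = false := by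
        simp only [PySem.Dict.contains, pvLinesChar]
        rw [List.any_eq_false]
        intro p hp
        rw [List.mem_map] at hp
        obtain ⟨v, hv, rfl⟩ := hp
        simp only [beq_eq_false_iff_ne]
        intro e; exact hkd ((beq_iff_eq.mp e) ▸ hv)
      have hgetD : PySem.Dict.getD (⟨pvLinesChar b uk ws⟩ : PySem.Dict Int _) w.1 [] = [] := by
        simp only [PySem.Dict.getD, PySem.Dict.get?]
        rw [hfind w.1, if_neg hkd]
        rfl
      simp only [PySem.Dict.insert, hcont, Bool.false_eq_true, hgetD]
      rw [PySem.Dict.mk.injEq]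
      show pvLinesChar b uk ws ++ [(w.1, [] ++ _)] = pvLinesChar b uk (ws ++ [w])
      rw [List.nil_append, pvLinesChar, pvLinesChar]
      have hdd2 : PySem.List.dedup ((ws ++ [w]).map (fun x => x.1)) =
          PySem.List.dedup (ws.map (fun x => x.1)) ++ [w.1] := by
        rw [List.map_append, List.map_cons, List.map_nil, pv_dedup_append_singleton, if_neg]
        rw [PySem.List.dedup_eq_ofList, List.contains_eq_mem]
        simp only [decide_eq_true_eq]
        intro hc; exact hmem ((PySem.Set.mem_ofList _ _).mp hc)
      rw [hdd2, List.map_append, List.map_cons, List.map_nil]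
      congr 1
      · apply List.map_congr_left
        intro v hv
        have hvk : v ≠ w.1 := fun e => hkd (e ▸ hv)
        have hf : (ws ++ [w]).filter (fun x => x.1 == v) = ws.filter (fun x => x.1 == v) := by
          rw [List.filter_append]
          simp [show (w.1 == v) = false by simpa using fun e => hvk e.symm]
        rw [hf]
      · have hf : (ws ++ [w]).filter (fun x => x.1 == w.1) = [w] := by
          rw [List.filter_append]
          have h1 : ws.filter (fun x => x.1 == w.1) = [] := by
            apply List.filter_eq_nil_iff.mpr
            intro x hx hc
            exact hmem (List.mem_map.mpr ⟨x, hx, by simpa using hc⟩)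
          simp [h1]
        rw [hf]
        rfl

-- ---------- A's run machine, characterised by runsSpec ----------

theorem pv_machine_same_flag (qs : List (String × Bool)) (f : Bool) :
    ∀ (parts ts : List String), (∀ q ∈ qs, q.2 = f) →
    qs.foldl pvStep (parts, ts, some f) = (parts, ts ++ qs.map (fun q => q.1), some f) := by
  induction qs with
  | nil => intro parts ts _; simp
  | cons q t ih =>
    intro parts ts hq
    rw [List.foldl_cons]
    have hqf : q.2 = f := hq q (List.mem_cons_self ..)
    have : pvStep (parts, ts, some f) q = (parts, ts ++ [q.1], some f) := by
      simp [pvStep, hqf]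
    rw [this, ih _ _ (fun y hy => hq y (List.mem_cons_of_mem _ hy))]
    simp

theorem pv_wrap_eq (f : Bool) (ts : List String) :
    (if (some f : Option Bool) = some true then "<u>" ++ PySem.Str.join " " ts ++ "</u>"
     else PySem.Str.join " " ts) = pvRender f ts := by
  cases f <;> simp [pvRender, pvWrap]

theorem pv_machine_tail (ps : List (String × Bool)) :
    ∀ (parts ts : List String) (f : Bool), ts ≠ [] →
      (∀ p, ps.head? = some p → p.2 ≠ f) →
      pvFlush (ps.foldl pvStep (parts, ts, some f)) =
        parts ++ [pvRender f ts] ++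
          (runsSpec (fun t => t.2) ps).map (fun fr => pvRender fr.1 (fr.2.map (fun t => t.1))) := by
  induction ps using runsSpec.induct (key := fun t : String × Bool => t.2) with
  | case1 =>
    intro parts ts f hts _
    simp only [List.foldl_nil, runsSpec, List.map_nil, List.append_nil]
    rw [pvFlush, if_pos hts, pv_wrap_eq]
  | case2 p t ih =>
    intro parts ts f hts hhead
    have hpf : p.2 ≠ f := hhead p rfl
    rw [List.foldl_cons]
    have hstep : pvStep (parts, ts, some f) p =
        (parts ++ [pvRender f ts], [p.1], some p.2) := by
      rw [pvStep, if_pos (by simpa using fun e => hpf e), if_pos hts, pv_wrap_eq]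
    rw [hstep]
    have hsplit : t = t.takeWhile (fun y => y.2 == p.2) ++ t.dropWhile (fun y => y.2 == p.2) :=
      (List.takeWhile_append_dropWhile).symm
    rw [show (t.foldl pvStep (parts ++ [pvRender f ts], [p.1], some p.2)) =
        ((t.takeWhile (fun y => y.2 == p.2) ++ t.dropWhile (fun y => y.2 == p.2)).foldl pvStep
          (parts ++ [pvRender f ts], [p.1], some p.2)) from by rw [← hsplit]]
    rw [List.foldl_append]
    rw [pv_machine_same_flag _ p.2 _ _ (fun y hy => by simpa using List.mem_takeWhile_imp hy)]
    cases hd : t.dropWhile (fun y => y.2 == p.2) with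
    | nil =>
      rw [List.foldl_nil]
      rw [pvFlush, if_pos (by simp), pv_wrap_eq]
      rw [runsSpec, hd, runsSpec]
      simp
    | cons z zs =>
      rw [← hd]
      rw [ih _ _ p.2 (by simp) ?_]
      · rw [runsSpec, hd]
        simp
      · intro q hq
        rw [hd, List.head?_cons, Option.some_inj] at hq
        subst hq
        have := pv_head_dropWhile _ t z zs hd
        simpa using this

theorem pv_machine (ps : List (String × Bool)) :
    pvFlush (ps.foldl pvStep ([], [], none)) =
      (runsSpec (fun t => t.2) ps).map (fun fr => pvRender fr.1 (fr.2.map (fun t => t.1))) := by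
  cases ps with
  | nil => simp [runsSpec, pvFlush]
  | cons p t =>
    rw [List.foldl_cons]
    have hstep : pvStep ([], [], none) p = ([], [p.1], some p.2) := by
      simp [pvStep]
    rw [hstep]
    have hsplit : t = t.takeWhile (fun y => y.2 == p.2) ++ t.dropWhile (fun y => y.2 == p.2) :=
      (List.takeWhile_append_dropWhile).symm
    rw [show (t.foldl pvStep ([], [p.1], some p.2)) =
        ((t.takeWhile (fun y => y.2 == p.2) ++ t.dropWhile (fun y => y.2 == p.2)).foldl pvStep
          ([], [p.1], some p.2)) from by rw [← hsplit]]
    rw [List.foldl_append]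
    rw [pv_machine_same_flag _ p.2 _ _ (fun y hy => by simpa using List.mem_takeWhile_imp hy)]
    cases hd : t.dropWhile (fun y => y.2 == p.2) with
    | nil =>
      rw [List.foldl_nil]
      rw [pvFlush, if_pos (by simp), pv_wrap_eq]
      rw [runsSpec, hd, runsSpec]
      simp
    | cons z zs =>
      rw [← hd]
      rw [pv_machine_tail _ _ _ p.2 (by simp) ?_]
      · rw [runsSpec]
        simp
      · intro q hq
        rw [hd, List.head?_cons, Option.some_inj] at hq
        subst hq
        have := pv_head_dropWhile _ t z zs hd
        simpa using this

-- ---------- B's neighbour decoration, characterised ----------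

def pvLineHead (pf : Bool) (t : String) (flag nxtF : Bool) : String :=
  if flag then
    (if !nxtF then (if !pf then ("<u>" ++ t) else t) ++ "</u>"
     else (if !pf then ("<u>" ++ t) else t))
  else t

def pvDec1 (prev : Option (Int × String × Bool)) (x : Int × String × Bool)
    (nxt : Option (Int × String × Bool)) : String :=
  if x.2.2 then
    let piece :=
      if (match prev with | none => true | some q => !q.2.2 || decide (q.1 ≠ x.1))
      then "<u>" ++ x.2.1 else x.2.1
    if (match nxt with | none => true | some q => !q.2.2 || decide (q.1 ≠ x.1))
    then piece ++ "</u>" else piece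
  else x.2.1

def pvDecPieces (prev : Option (Int × String × Bool)) : List (Int × String × Bool) → List String
  | [] => []
  | x :: rest => pvDec1 prev x rest.head? :: pvDecPieces (some x) rest

theorem pv_enumerate_decorate :
    ∀ (t pre : List (Int × String × Bool)),
      (PySem.List.enumerate t ((pre.length : Int))).map (fun p => pvPieceB (pre ++ t) p) =
        pvDecPieces pre.getLast? t := by
  intro t
  induction t with
  | nil => intro pre; simp [pvDecPieces]
  | cons x t' ih =>
    intro pre
    rw [PySem.List.enumerate_cons, List.map_cons, pvDecPieces]
    congr 1
    case _ =>
      -- head: pvPieceB (pre ++ x :: t') (pre.length, x) = pvDec1 pre.getLast? x t'.head?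
      have hprev : (if 0 < (pre.length : Int) then PySem.List.pyGet? (pre ++ x :: t') ((pre.length : Int) - 1) else none) = pre.getLast? := by
        rcases List.eq_nil_or_concat pre with rfl | ⟨p0, y, rfl⟩
        · simp
        · simp only [List.concat_eq_append]
          rw [if_pos (by simp)]
          have e : ((p0 ++ [y]).length : Int) - 1 = (p0.length : Int) := by simp
          rw [e, List.append_assoc, List.singleton_append, PySem.List.pyGet?_append_length]
          simp
      have hnxt : (if (pre.length : Int) + 1 < (((pre ++ x :: t').length : Nat) : Int) then PySem.List.pyGet? (pre ++ x :: t') ((pre.length : Int) + 1) else none) = t'.head? := by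
        cases t' with
        | nil => rw [if_neg (by simp)]; rfl
        | cons z t'' =>
          rw [if_pos (by simp)]
          have e : (pre.length : Int) + 1 = (((pre ++ [x]).length : Nat) : Int) := by simp
          rw [e, show pre ++ x :: z :: t'' = (pre ++ [x]) ++ z :: t'' by simp,
            PySem.List.pyGet?_append_length]
          rfl
      show pvPieceB (pre ++ x :: t') ((pre.length : Int), x) = pvDec1 pre.getLast? x t'.head?
      simp only [pvPieceB, pvDec1]
      rw [hprev, hnxt]
    case _ =>
      have e : (pre.length : Int) + 1 = (((pre ++ [x]).length : Nat) : Int) := by simp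
      rw [e, show pre ++ x :: t' = (pre ++ [x]) ++ t' by simp, ih (pre ++ [x]),
        List.getLast?_concat]

-- linePieces: decoration within one line, as a recursion on (text, flag) pairs
def pvLinePieces (pf : Bool) : List (String × Bool) → List String
  | [] => []
  | x :: rest =>
      pvLineHead pf x.1 x.2 (((rest.head?).map (fun q => q.2)).getD false) :: pvLinePieces x.2 rest

def pvPf (v : Int) : Option (Int × String × Bool) → Bool
  | none => false
  | some q => q.2.2 && q.1 == v

theorem pv_getLast?_cons_or {α : Type} (x : α) (l : List α) :
    (x :: l).getLast? = l.getLast?.or (some x) := by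
  cases l with
  | nil => rfl
  | cons y t =>
    rw [List.getLast?_cons_cons]
    cases h : (y :: t).getLast? with
    | none => simp at h
    | some z => rfl

theorem pv_decPieces_line (v : Int) :
    ∀ (l k : List (Int × String × Bool)) (prev : Option (Int × String × Bool)),
      (∀ x ∈ l, x.1 = v) → (∀ y, k.head? = some y → y.1 ≠ v) →
      pvDecPieces prev (l ++ k) =
        pvLinePieces (pvPf v prev) (l.map (fun x => (x.2.1, x.2.2))) ++
          pvDecPieces (l.getLast?.or prev) k := by
  intro l
  induction l with
  | nil => intro k prev _ _; simp [pvLinePieces]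
  | cons x l' ih =>
    intro k prev hl hk
    have hxv : x.1 = v := hl x (List.mem_cons_self ..)
    rw [List.cons_append, pvDecPieces, List.map_cons, pvLinePieces, List.cons_append]
    congr 1
    · -- head piece
      have hopen : (match prev with | none => true | some q => !q.2.2 || decide (q.1 ≠ x.1)) =
          !(pvPf v prev) := by
        cases prev with
        | none => rfl
        | some q =>
          subst hxv
          by_cases hq : q.1 = x.1 <;> by_cases hf : q.2.2 <;> simp [pvPf, hq, hf]
      have hclose : (match (l' ++ k).head? with | none => true | some q => !q.2.2 || decide (q.1 ≠ x.1)) =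
          !((((l'.map (fun x => (x.2.1, x.2.2))).head?).map (fun q => q.2)).getD false) := by
        cases l' with
        | nil =>
          simp only [List.nil_append, List.map_nil, List.head?_nil, Option.map_none, Option.getD_none]
          cases hkh : k.head? with
          | none => rfl
          | some y =>
            have : y.1 ≠ v := hk y hkh
            simp [this, hxv]
        | cons z l'' =>
          have hzv : z.1 = v := hl z (by simp)
          simp [hzv, hxv]
      simp only [pvDec1, pvLineHead, hopen, hclose]
    · rw [ih k (some x) (fun y hy => hl y (List.mem_cons_of_mem _ hy)) hk]
      have : pvPf v (some x) = x.2.2 := by simp [pvPf, hxv]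
      rw [this, pv_getLast?_cons_or]
      cases hgl : l'.getLast? with
      | none => rfl
      | some z => rfl

def pvCloseU : List String → List String
  | [] => []
  | [t] => [t ++ "</u>"]
  | t :: r :: rest => t :: pvCloseU (r :: rest)

def pvMarkTexts (f : Bool) (ts : List String) : List String :=
  if f then (match ts with | [] => [] | t :: rest => pvCloseU (("<u>" ++ t) :: rest)) else ts

theorem pv_lineP_seg (f : Bool) :
    ∀ (seg k : List (String × Bool)), (∀ q ∈ seg, q.2 = f) →
      (∀ h, k.head? = some h → h.2 ≠ f) →
      pvLinePieces f (seg ++ k) =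
        (if f then pvCloseU (seg.map (fun q => q.1)) else seg.map (fun q => q.1)) ++
          pvLinePieces f k := by
  intro seg
  induction seg with
  | nil => intro k _ _; simp [pvCloseU]
  | cons x seg' ih =>
    intro k hseg hk
    have hxf : x.2 = f := hseg x (List.mem_cons_self ..)
    rw [List.cons_append, pvLinePieces, hxf,
      ih k (fun q hq => hseg q (List.mem_cons_of_mem _ hq)) hk, List.map_cons]
    by_cases hf : f = true
    · rw [if_pos hf, if_pos hf]
      subst hf
      cases hsg : seg' with
      | nil =>
        have hnxtF : ((Option.map (fun q => q.2) (([] : List (String × Bool)) ++ k).head?).getD false) = false := by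
          cases hkh : k.head? with
          | none => simp [hkh]
          | some y =>
            have := hk y hkh
            cases h2 : y.2
            · simp [hkh, h2]
            · exact absurd h2 this
        rw [hnxtF, pvLineHead]
        simp [pvCloseU]
      | cons z seg2 =>
        have hzf : z.2 = true := by
          have : z ∈ seg' := by rw [hsg]; simp
          exact hseg z (List.mem_cons_of_mem _ this)
        rw [pvLineHead]
        simp [hzf, pvCloseU]
    · have hf' : f = false := by simpa using hf
      subst hf'
      rw [if_neg (by simp), if_neg (by simp), pvLineHead]
      simp

theorem pv_lineP_irrel :
    ∀ (l : List (String × Bool)) (pf pf' : Bool),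
      (∀ h, l.head? = some h → h.2 = false) →
      pvLinePieces pf l = pvLinePieces pf' l := by
  intro l pf pf' hh
  cases l with
  | nil => rfl
  | cons x rest =>
    have hx : x.2 = false := hh x rfl
    rw [pvLinePieces, pvLinePieces, pvLineHead, pvLineHead, if_neg (by simp [hx]),
      if_neg (by simp [hx])]

theorem pv_lineP_runs :
    ∀ (qs : List (String × Bool)),
      pvLinePieces false qs =
        (runsSpec (fun t => t.2) qs).flatMap (fun fr => pvMarkTexts fr.1 (fr.2.map (fun t => t.1))) := by
  intro qs
  induction qs using runsSpec.induct (key := fun t : String × Bool => t.2) with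
  | case1 => rw [runsSpec]; rfl
  | case2 x t ih =>
    rw [runsSpec, List.flatMap_cons]
    have hsplit : t = t.takeWhile (fun y => y.2 == x.2) ++ t.dropWhile (fun y => y.2 == x.2) :=
      (List.takeWhile_append_dropWhile).symm
    have htw : ∀ q ∈ t.takeWhile (fun y => y.2 == x.2), q.2 = x.2 := by
      intro q hq; simpa using List.mem_takeWhile_imp hq
    have hdw : ∀ h, (t.dropWhile (fun y => y.2 == x.2)).head? = some h → h.2 ≠ x.2 := by
      intro h hh
      cases hd : t.dropWhile (fun y => y.2 == x.2) with
      | nil => rw [hd] at hh; simp at hh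
      | cons z zs =>
        rw [hd, List.head?_cons, Option.some_inj] at hh
        subst hh
        have := pv_head_dropWhile _ t z zs hd
        simpa using this
    conv_lhs => rw [hsplit]
    rw [pvLinePieces, pv_lineP_seg x.2 _ _ htw hdw]
    have hirrel : pvLinePieces x.2 (t.dropWhile (fun y => y.2 == x.2)) =
        pvLinePieces false (t.dropWhile (fun y => y.2 == x.2)) := by
      by_cases hx2 : x.2 = true
      · apply pv_lineP_irrel
        intro h hh
        have := hdw h hh
        rw [hx2] at this
        cases h2 : h.2
        · rfl
        · exact absurd h2 this
      · have : x.2 = false := by simpa using hx2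
        rw [this]
    rw [hirrel, ih, ← List.cons_append]
    congr 1
    by_cases hx2 : x.2 = true
    · rw [pvLineHead, if_pos hx2]
      cases htww : t.takeWhile (fun y => y.2 == x.2) with
      | nil =>
        have hnxtF : ((Option.map (fun q => q.2)
            (([] : List (String × Bool)) ++ t.dropWhile (fun y => y.2 == x.2)).head?).getD false) = false := by
          cases hd : (t.dropWhile (fun y => y.2 == x.2)).head? with
          | none => simp [hd]
          | some y =>
            have := hdw y hd
            rw [hx2] at this
            cases h2 : y.2
            · simp [hd, h2]
            · exact absurd h2 this
        rw [hnxtF]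
        simp [pvMarkTexts, pvCloseU, hx2]
      | cons z tw2 =>
        have hzf : z.2 = true := by
          have hz : z ∈ t.takeWhile (fun y => y.2 == x.2) := by rw [htww]; simp
          rw [← hx2]; exact htw z hz
        have hnxtF : ((Option.map (fun q => q.2)
            ((z :: tw2) ++ t.dropWhile (fun y => y.2 == x.2)).head?).getD false) = true := by
          simp [hzf]
        rw [hnxtF]
        simp [pvMarkTexts, pvCloseU, hx2]
    · have hx2' : x.2 = false := by simpa using hx2
      rw [pvLineHead, if_neg (by simp [hx2']), if_neg (by simp [hx2'])]
      simp [pvMarkTexts, hx2']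

-- ---------- string-join algebra ----------

theorem pv_join_singleton (s x : String) : PySem.Str.join s [x] = x := by
  apply String.toList_inj.mp
  rw [PySem.Str.toList_join, List.map_cons, List.map_nil, PySem.Chars.join_singleton]

theorem pv_join_cons_cons (s x y : String) (t : List String) :
    PySem.Str.join s (x :: y :: t) = x ++ s ++ PySem.Str.join s (y :: t) := by
  apply String.toList_inj.mp
  rw [PySem.Str.toList_join, List.map_cons, List.map_cons, PySem.Chars.join_cons_cons]
  simp [String.toList_append, PySem.Str.toList_join]

theorem pv_join_append (s : String) :
    ∀ (l1 l2 : List String), l1 ≠ [] → l2 ≠ [] →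
      PySem.Str.join s (l1 ++ l2) = PySem.Str.join s l1 ++ s ++ PySem.Str.join s l2 := by
  intro l1
  induction l1 with
  | nil => intro l2 h1 _; exact absurd rfl h1
  | cons x t1 ih =>
    intro l2 _ h2
    cases t1 with
    | nil =>
      cases l2 with
      | nil => exact absurd rfl h2
      | cons y t => rw [List.singleton_append, pv_join_cons_cons, pv_join_singleton]
    | cons x2 t2 =>
      calc PySem.Str.join s ((x :: x2 :: t2) ++ l2)
          = PySem.Str.join s (x :: x2 :: (t2 ++ l2)) := by simp
        _ = x ++ s ++ PySem.Str.join s (x2 :: (t2 ++ l2)) := pv_join_cons_cons ..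
        _ = x ++ s ++ PySem.Str.join s ((x2 :: t2) ++ l2) := by rw [List.cons_append]
        _ = x ++ s ++ (PySem.Str.join s (x2 :: t2) ++ s ++ PySem.Str.join s l2) := by
              rw [ih l2 (by simp) h2]
        _ = PySem.Str.join s (x :: x2 :: t2) ++ s ++ PySem.Str.join s l2 := by
              rw [pv_join_cons_cons]; simp [String.append_assoc]

theorem pv_join_flatten (s : String) :
    ∀ (parts : List (List String)), (∀ p ∈ parts, p ≠ []) →
      PySem.Str.join s (parts.map (PySem.Str.join s)) = PySem.Str.join s parts.flatten := by
  intro parts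
  induction parts with
  | nil => intro _; rfl
  | cons p ps ih =>
    intro hne
    have hp : p ≠ [] := hne p (List.mem_cons_self ..)
    cases ps with
    | nil => simp [pv_join_singleton]
    | cons q ps2 =>
      have hq : q ≠ [] := hne q (by simp)
      have hflat : (q :: ps2).flatten ≠ [] := by
        rw [List.flatten_cons]
        cases q with
        | nil => exact absurd rfl hq
        | cons a b => simp
      rw [List.map_cons, List.flatten_cons,
        pv_join_append s p ((q :: ps2).flatten) hp hflat,
        ← ih (fun r hr => hne r (List.mem_cons_of_mem _ hr)),
        List.map_cons, pv_join_cons_cons]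

theorem pv_closeU_ne_nil (l : List String) (h : l ≠ []) : pvCloseU l ≠ [] := by
  match l with
  | [] => exact absurd rfl h
  | [t] => simp [pvCloseU]
  | t :: r :: rest => simp [pvCloseU]

theorem pv_join_closeU (s : String) :
    ∀ (l : List String), l ≠ [] →
      PySem.Str.join s (pvCloseU l) = PySem.Str.join s l ++ "</u>" := by
  intro l
  induction l using pvCloseU.induct with
  | case1 => intro h; exact absurd rfl h
  | case2 t => intro _; rw [pvCloseU, pv_join_singleton, pv_join_singleton]
  | case3 t r rest ih =>
    intro _
    rw [pvCloseU]
    cases hcl : pvCloseU (r :: rest) with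
    | nil => exact absurd hcl (pv_closeU_ne_nil _ (by simp))
    | cons c cs =>
      calc PySem.Str.join s (t :: c :: cs)
          = t ++ s ++ PySem.Str.join s (c :: cs) := pv_join_cons_cons ..
        _ = t ++ s ++ (PySem.Str.join s (r :: rest) ++ "</u>") := by rw [← hcl, ih (by simp)]
        _ = PySem.Str.join s (t :: r :: rest) ++ "</u>" := by
              rw [pv_join_cons_cons]; simp [String.append_assoc]

theorem pv_join_open (s t : String) (rest : List String) :
    PySem.Str.join s (("<u>" ++ t) :: rest) = "<u>" ++ PySem.Str.join s (t :: rest) := by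
  cases rest with
  | nil => rw [pv_join_singleton, pv_join_singleton]
  | cons y ys =>
    rw [pv_join_cons_cons, pv_join_cons_cons]
    simp [String.append_assoc]

theorem pv_join_markTexts (f : Bool) (ts : List String) (h : ts ≠ []) :
    PySem.Str.join " " (pvMarkTexts f ts) = pvRender f ts := by
  cases f with
  | false => simp [pvMarkTexts, pvRender, pvWrap]
  | true =>
    cases ts with
    | nil => exact absurd rfl h
    | cons t rest =>
      show PySem.Str.join " " (pvCloseU (("<u>" ++ t) :: rest)) = _
      rw [pv_join_closeU _ _ (by simp), pv_join_open]
      rw [pvRender, pvWrap, if_pos rfl, String.append_assoc]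

-- ---------- final assembly ----------

def pvLs (ws : List (Int × Int × String)) : List Int :=
  PySem.List.sorted (PySem.List.dedup (ws.map (fun w => w.1))) (fun k => k) false

def pvQ (b : Int) (uk : List (Int × Int × Int)) (ws : List (Int × Int × String)) (v : Int) :
    List (String × Bool) :=
  (PySem.List.sorted (ws.filter (fun x => x.1 == v)) (fun w => w.2.1) false).map
    (fun w => (w.2.2, decide ((b, v, w.2.1) ∈ uk)))

def pvLn (b : Int) (uk : List (Int × Int × Int)) (ws : List (Int × Int × String)) (v : Int) :
    List (Int × String × Bool) :=
  (PySem.List.sorted (ws.filter (fun x => x.1 == v)) (fun w => w.2.1) false).map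
    (fun w => (v, w.2.2, decide ((b, v, w.2.1) ∈ uk)))

theorem pv_runsSpec_ne_nil {α κ : Type} [BEq κ] (key : α → κ) :
    ∀ (l : List α), ∀ g ∈ runsSpec key l, g.2 ≠ [] := by
  intro l
  induction l using runsSpec.induct (key := key) with
  | case1 => intro g hg; rw [runsSpec] at hg; simp at hg
  | case2 x t ih =>
    intro g hg
    rw [runsSpec] at hg
    rcases List.mem_cons.mp hg with rfl | hg'
    · simp
    · exact ih g hg'

theorem pv_markTexts_ne_nil (f : Bool) (ts : List String) (h : ts ≠ []) :
    pvMarkTexts f ts ≠ [] := by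
  cases ts with
  | nil => exact absurd rfl h
  | cons t rest =>
    cases f with
    | false => simp [pvMarkTexts]
    | true =>
      show pvCloseU (("<u>" ++ t) :: rest) ≠ []
      exact pv_closeU_ne_nil _ (by simp)

theorem pv_runs_flatMap_ne_nil (qs : List (String × Bool)) (h : qs ≠ []) :
    (runsSpec (fun t => t.2) qs).flatMap
      (fun fr => pvMarkTexts fr.1 (fr.2.map (fun t => t.1))) ≠ [] := by
  cases qs with
  | nil => exact absurd rfl h
  | cons x t =>
    rw [runsSpec, List.flatMap_cons]
    have := pv_markTexts_ne_nil x.2 ((x :: t.takeWhile (fun y => y.2 == x.2)).map (fun t => t.1))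
      (by simp)
    intro hc
    rcases List.append_eq_nil_iff.mp hc with ⟨h1, _⟩
    exact this h1

theorem pv_decPieces_flat (Ln : Int → List (Int × String × Bool)) :
    ∀ (ls : List Int) (prev : Option (Int × String × Bool)),
      (∀ v ∈ ls, Ln v ≠ [] ∧ ∀ x ∈ Ln v, x.1 = v) →
      ls.Pairwise (· < ·) →
      (∀ q, prev = some q → ∀ v ∈ ls, q.1 < v) →
      pvDecPieces prev (ls.flatMap Ln) =
        ls.flatMap (fun v => pvLinePieces false ((Ln v).map (fun x => (x.2.1, x.2.2)))) := by
  intro ls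
  induction ls with
  | nil => intro prev _ _ _; rfl
  | cons v ls' ih =>
    intro prev hln hpw hprev
    rw [List.flatMap_cons, List.flatMap_cons]
    obtain ⟨hne, hcst⟩ := hln v (List.mem_cons_self ..)
    have hk : ∀ y, (ls'.flatMap Ln).head? = some y → y.1 ≠ v := by
      intro y hy
      cases ls' with
      | nil => simp at hy
      | cons v2 ls2 =>
        obtain ⟨hne2, hcst2⟩ := hln v2 (by simp)
        rw [List.flatMap_cons] at hy
        cases hl2 : Ln v2 with
        | nil => exact absurd hl2 hne2
        | cons z zs =>
          rw [hl2, List.cons_append, List.head?_cons, Option.some_inj] at hy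
          subst hy
          have hz : z.1 = v2 := hcst2 z (by rw [hl2]; simp)
          have : v < v2 := (List.pairwise_cons.mp hpw).1 v2 (by simp)
          rw [hz]
          omega
    rw [pv_decPieces_line v (Ln v) (ls'.flatMap Ln) prev hcst hk]
    have hpf : pvPf v prev = false := by
      cases hp : prev with
      | none => rfl
      | some q =>
        have : q.1 < v := hprev q hp v (List.mem_cons_self ..)
        simp [pvPf]
        intro _
        omega
    rw [hpf]
    congr 1
    cases hgl : (Ln v).getLast? with
    | none => exact absurd (List.getLast?_eq_none_iff.mp hgl) hne
    | some z =>
      have hz : z ∈ Ln v := List.mem_of_getLast? hgl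
      have hzv : z.1 = v := hcst z hz
      show pvDecPieces (some z) _ = _
      apply ih (some z) (fun u hu => hln u (List.mem_cons_of_mem _ hu)) hpw.tail
      intro q hq u hu
      rw [Option.some_inj] at hq
      subst hq
      rw [hzv]
      exact (List.pairwise_cons.mp hpw).1 u hu

theorem pv_A_side (b : Int) (ws : List (Int × Int × String)) (uk : List (Int × Int × Int)) :
    build_text_with_underlines_py b ws uk =
      PySem.Str.join " " ((pvLs ws).map (fun v =>
        PySem.Str.join " " ((runsSpec (fun t : String × Bool => t.2) (pvQ b uk ws v)).map
          (fun fr => pvRender fr.1 (fr.2.map (fun t => t.1)))))) := by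
  simp only [build_text_with_underlines_py]
  rw [pv_lines_eq b uk ws]
  rw [show PySem.Dict.keys (⟨pvLinesChar b uk ws⟩ : PySem.Dict Int (List (Int × String × Bool))) =
      PySem.List.dedup (ws.map (fun w => w.1)) from by
    simp only [PySem.Dict.keys, pvLinesChar, List.map_map]
    rw [show ((fun x : Int × List (Int × String × Bool) => x.1) ∘
        fun v => (v, List.map (pvItem b uk) (List.filter (fun w => w.1 == v) ws))) = id from rfl,
      List.map_id]]
  rw [pv_step_eq]
  rw [PySem.List.foldl_append_singleton_eq_map, List.nil_append]
  show PySem.Str.join " " _ = _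
  congr 1
  apply List.map_congr_left
  intro v hv
  have hvd : v ∈ PySem.List.dedup (ws.map (fun w => w.1)) := (PySem.List.mem_sorted _ _ _ _).mp hv
  have hget : (⟨pvLinesChar b uk ws⟩ : PySem.Dict Int (List (Int × String × Bool))).getD v [] =
      (ws.filter (fun x => x.1 == v)).map (pvItem b uk) := by
    simp only [PySem.Dict.getD, PySem.Dict.get?, pvLinesChar]
    rw [pv_find_map (fun u => (ws.filter (fun w => w.1 == u)).map (pvItem b uk))
      (PySem.List.dedup (ws.map (fun w => w.1))) v, if_pos hvd]
    rfl
  rw [pv_flush_eq, hget]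
  rw [pv_sorted_map (pvItem b uk) (fun x : Int × String × Bool => x.1) (ws.filter (fun x => x.1 == v))]
  rw [show (fun a : Int × Int × String => (pvItem b uk a).1) = (fun w : Int × Int × String => w.2.1) from rfl]
  rw [← List.foldl_map (f := fun x : Int × String × Bool => x.2) (g := pvStep), List.map_map]
  rw [show ((fun x : Int × String × Bool => x.2) ∘ pvItem b uk) =
    (fun w : Int × Int × String => (w.2.2, decide ((b, w.1, w.2.1) ∈ uk))) from rfl]
  have hmc : (PySem.List.sorted (ws.filter (fun x => x.1 == v)) (fun w => w.2.1) false).map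
      (fun w => (w.2.2, decide ((b, w.1, w.2.1) ∈ uk))) =
      (PySem.List.sorted (ws.filter (fun x => x.1 == v)) (fun w => w.2.1) false).map
      (fun w => (w.2.2, decide ((b, v, w.2.1) ∈ uk))) := by
    apply List.map_congr_left
    intro c hc
    have hc1 : c.1 = v := by
      simpa using List.of_mem_filter ((PySem.List.mem_sorted _ _ _ _).mp hc)
    rw [hc1]
  rw [hmc, pv_machine]
  rfl

theorem pv_B_side (b : Int) (ws : List (Int × Int × String)) (uk : List (Int × Int × Int)) :
    build_text_with_underlines_py_alt b ws uk =
      PySem.Str.join " " ((pvLs ws).flatMap (fun v => pvLinePieces false (pvQ b uk ws v))) := by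
  simp only [build_text_with_underlines_py_alt]
  rw [PySem.List.foldl_append_singleton_eq_map, List.nil_append]
  congr 1
  -- name the decorated word stream
  have hdec := pv_enumerate_decorate
    ((PySem.List.sorted2 ws (fun w => w.1) (fun w => w.2.1) false).map
      (fun w => (w.1, w.2.2, decide ((b, w.1, w.2.1) ∈ uk)))) []
  simp only [List.length_nil, Nat.cast_zero, List.nil_append, List.getLast?_nil] at hdec
  rw [hdec]
  -- decompose the globally sorted stream into its per-line blocks
  have hys_mem : ∀ v : Int, v ∈ pvLs ws ↔
      v ∈ (PySem.List.sorted ws (fun w => w.2.1) false).map (fun y => y.1) := by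
    intro v
    rw [pvLs, PySem.List.mem_sorted, PySem.List.dedup_eq_ofList, PySem.Set.mem_ofList]
    exact (((PySem.List.sorted_perm ws (fun w => w.2.1) false).map (fun y => y.1)).mem_iff (a := v)).symm
  have hpair : (pvLs ws).Pairwise (· < ·) := by
    rw [pvLs, PySem.List.dedup_eq_ofList]
    exact PySem.List.sorted_ofList_pairwise_lt _
  have hdecomp := pv_decomp (fun y : Int × Int × String => y.1)
    (PySem.List.sorted ws (fun w => w.2.1) false) (pvLs ws) hpair hys_mem
  have hseq : (PySem.List.sorted2 ws (fun w => w.1) (fun w => w.2.1) false).map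
      (fun w => (w.1, w.2.2, decide ((b, w.1, w.2.1) ∈ uk))) =
      (pvLs ws).flatMap (pvLn b uk ws) := by
    rw [pv_two_pass, hdecomp, List.map_flatMap]
    apply List.flatMap_congr
    intro v hvmem
    rw [pv_filter_sorted (fun w : Int × Int × String => w.2.1) _ ws]
    rw [pvLn]
    apply List.map_congr_left
    intro w hw
    have hw1 : w.1 = v := by
      simpa using List.of_mem_filter ((PySem.List.mem_sorted _ _ _ _).mp hw)
    rw [hw1]
  rw [hseq]
  have hlnprops : ∀ v ∈ pvLs ws, pvLn b uk ws v ≠ [] ∧ ∀ x ∈ pvLn b uk ws v, x.1 = v := by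
    intro v hvls
    constructor
    · have hvm : v ∈ (PySem.List.sorted ws (fun w => w.2.1) false).map (fun y => y.1) :=
        (hys_mem v).mp hvls
      rw [List.mem_map] at hvm
      obtain ⟨y, hy, hy1⟩ := hvm
      have hy' : y ∈ ws := (PySem.List.mem_sorted _ _ _ _).mp hy
      rw [pvLn]
      intro hc
      rw [List.map_eq_nil_iff, PySem.List.sorted_eq_nil_iff, List.filter_eq_nil_iff] at hc
      exact hc y hy' (by simpa using hy1)
    · intro x hx
      rw [pvLn, List.mem_map] at hx
      obtain ⟨w, _, rfl⟩ := hx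
      rfl
  rw [pv_decPieces_flat (pvLn b uk ws) (pvLs ws) none hlnprops hpair (by intro q hq; cases hq)]
  apply List.flatMap_congr
  intro v _
  rw [show (pvLn b uk ws v).map (fun x => (x.2.1, x.2.2)) = pvQ b uk ws v from by
    rw [pvLn, pvQ, List.map_map]; rfl]

theorem pv_final (b : Int) (ws : List (Int × Int × String)) (uk : List (Int × Int × Int)) :
    build_text_with_underlines_py b ws uk = build_text_with_underlines_py_alt b ws uk := by
  rw [pv_A_side, pv_B_side]
  have hQne : ∀ v ∈ pvLs ws, pvQ b uk ws v ≠ [] := by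
    intro v hvls
    have hvm : v ∈ (PySem.List.dedup (ws.map (fun w => w.1))) :=
      (PySem.List.mem_sorted _ _ _ _).mp hvls
    rw [PySem.List.dedup_eq_ofList, PySem.Set.mem_ofList, List.mem_map] at hvm
    obtain ⟨y, hy, hy1⟩ := hvm
    rw [pvQ]
    intro hc
    rw [List.map_eq_nil_iff, PySem.List.sorted_eq_nil_iff, List.filter_eq_nil_iff] at hc
    exact hc y hy (by simpa using hy1)
  -- per line: the rendered runs are a flat list of decorated texts
  have hline : ∀ v ∈ pvLs ws,
      PySem.Str.join " " ((runsSpec (fun t : String × Bool => t.2) (pvQ b uk ws v)).map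
        (fun fr => pvRender fr.1 (fr.2.map (fun t => t.1)))) =
      PySem.Str.join " " ((runsSpec (fun t : String × Bool => t.2) (pvQ b uk ws v)).flatMap
        (fun fr => pvMarkTexts fr.1 (fr.2.map (fun t => t.1)))) := by
    intro v hvls
    have h1 : (runsSpec (fun t : String × Bool => t.2) (pvQ b uk ws v)).map
        (fun fr => pvRender fr.1 (fr.2.map (fun t => t.1))) =
        ((runsSpec (fun t : String × Bool => t.2) (pvQ b uk ws v)).map
          (fun fr => pvMarkTexts fr.1 (fr.2.map (fun t => t.1)))).map (PySem.Str.join " ") := by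
      rw [List.map_map]
      apply List.map_congr_left
      intro fr hfr
      have : fr.2 ≠ [] := pv_runsSpec_ne_nil _ _ fr hfr
      simp only [Function.comp]
      rw [pv_join_markTexts fr.1 _ (by simpa using this)]
    rw [h1, pv_join_flatten _ _ ?hne, List.flatMap_def]
    case hne =>
      intro p hp
      rw [List.mem_map] at hp
      obtain ⟨fr, hfr, rfl⟩ := hp
      exact pv_markTexts_ne_nil _ _ (by simpa using pv_runsSpec_ne_nil _ _ fr hfr)
  rw [List.map_congr_left hline]
  -- collapse the nested joins into one flat join
  have h2 : ((pvLs ws).map (fun v =>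
      PySem.Str.join " " ((runsSpec (fun t : String × Bool => t.2) (pvQ b uk ws v)).flatMap
        (fun fr => pvMarkTexts fr.1 (fr.2.map (fun t => t.1)))))) =
      ((pvLs ws).map (fun v =>
        (runsSpec (fun t : String × Bool => t.2) (pvQ b uk ws v)).flatMap
          (fun fr => pvMarkTexts fr.1 (fr.2.map (fun t => t.1))))).map (PySem.Str.join " ") := by
    rw [List.map_map]; rfl
  rw [h2, pv_join_flatten _ _ ?hne2, ← List.flatMap_def]
  case hne2 =>
    intro p hp
    rw [List.mem_map] at hp
    obtain ⟨v, hv, rfl⟩ := hp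
    exact pv_runs_flatMap_ne_nil _ (hQne v hv)
  congr 1
  apply List.flatMap_congr
  intro v _
  rw [pv_lineP_runs]

-- ===== VERDICT (by name: the statement is the Claim_ definition above) =====
theorem build_text_with_underlines_py_spec : Claim_equal_build_text_with_underlines_py := by
  intro b ws uk _
  unfold Spec_build_text_with_underlines_py
  exact pv_final b ws uk
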